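-- pv_equiv track=rewrite | github.com/ptm1225/Coding_test_python | 프로그래머스/2/87946. 피로도/피로도.py | func
-- ===== SOURCE A (Python) =====
-- def func(k, arr):
--     count = 0
--     for i in arr:
--         minimum, use = i[0], i[1]
--         if minimum > k:
--             return count
--         else:
--             k -= use
--             count += 1
--     return count
-- ===== SOURCE B (Python) =====
-- def func(k, arr):
--     # Precompute stamina consumed before each dungeon, then find the first
--     # index where the requirement exceeds what is left of the original k.
--     prefix = []
--     total = 0
--     for row in arr:
--         prefix.append(total)
--         total += row[1]
--     idx = 0
--     for row in arr:
--         if row[0] + prefix[idx] > k: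
--             return idx
--         idx += 1
--     return len(arr)
-- ===== Notes on version B (the rewrite author's own statement) =====
-- stated objective: alternative
-- what changed: Replaces A's single pass that mutates k and a running count with a two-phase decomposition: first build a prefix-sum table of consumed stamina, then scan for the first index whose requirement exceeds the unchanged original k, returning that index.
-- outside the precondition, e.g. on func(0, [[5, 1], [9]]): A returns 0, B raises IndexError
import Mathlib
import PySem

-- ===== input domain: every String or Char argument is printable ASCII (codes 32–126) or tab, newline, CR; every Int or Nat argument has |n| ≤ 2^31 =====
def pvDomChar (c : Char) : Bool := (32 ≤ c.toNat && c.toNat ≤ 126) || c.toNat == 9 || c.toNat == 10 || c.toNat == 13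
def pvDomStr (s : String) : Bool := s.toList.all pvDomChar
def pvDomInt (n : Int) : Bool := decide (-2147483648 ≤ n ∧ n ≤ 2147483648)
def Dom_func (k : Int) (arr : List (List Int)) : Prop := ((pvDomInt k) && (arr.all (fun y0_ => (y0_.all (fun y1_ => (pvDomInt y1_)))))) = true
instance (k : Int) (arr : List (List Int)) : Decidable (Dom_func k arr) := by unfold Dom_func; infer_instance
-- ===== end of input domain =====

-- B re-decomposes A as prefix-sum table + first-failure scan (alternative decomposition, same cost); equivalence proved on rows of length ≥ 2.

-- ===== PORT A =====
-- A's loop: running k and count, stop at the first dungeon whose minimum exceeds the current k.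
def funcA_loop (k : Int) (count : Int) (arr : List (List Int)) : Int :=
  match arr with
  | [] => count
  | i :: rest =>
    let minimum := (PySem.List.pyGet? i 0).getD 0
    let use := (PySem.List.pyGet? i 1).getD 0
    if minimum > k then count else funcA_loop (k - use) (count + 1) rest

def func (k : Int) (arr : List (List Int)) : Int := funcA_loop k 0 arr

-- ===== PORT B =====
-- first pass of Source B: prefix.append(total); total += row[1]
def funcB_prefix (acc : List Int) (total : Int) (arr : List (List Int)) : List Int :=
  match arr with
  | [] => acc
  | row :: rest => funcB_prefix (acc ++ [total]) (total + (PySem.List.pyGet? row 1).getD 0) rest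

-- second pass of Source B: return idx at the first row with row[0] + prefix[idx] > k
def funcB_scan (k : Int) (pfx : List Int) (idx : Int) (arr : List (List Int)) : Int :=
  match arr with
  | [] => idx
  | row :: rest =>
    if (PySem.List.pyGet? row 0).getD 0 + (PySem.List.pyGet? pfx idx).getD 0 > k then idx
    else funcB_scan k pfx (idx + 1) rest

def func_alt (k : Int) (arr : List (List Int)) : Int :=
  funcB_scan k (funcB_prefix [] 0 arr) 0 arr

-- ===== PRECONDITION & SPEC =====
-- Pre_ excludes arrays containing a row of length < 2: Python A raises IndexError on any such
-- row it reaches, and B's prefix pass touches row[1] of EVERY row, so B raises on rows A's early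
-- return never reads (see cites).
def Pre_func (k : Int) (arr : List (List Int)) : Prop := ∀ row ∈ arr, 2 ≤ row.length
instance (k : Int) (arr : List (List Int)) : Decidable (Pre_func k arr) := by unfold Pre_func; infer_instance

def pvWitness_func : Int × List (List Int) := (2, [[1, 1], [3, 1]])

def Spec_func (k : Int) (arr : List (List Int)) (out : Int) : Prop := out = func_alt k arr
instance (k : Int) (arr : List (List Int)) (out : Int) : Decidable (Spec_func k arr out) := by unfold Spec_func; infer_instance

-- ===== CLAIM (what is proved, stated in full; the proofs are below) =====
def Claim_equal_func : Prop := ∀ (k : Int) (arr : List (List Int)), Dom_func k arr → Pre_func k arr → Spec_func k arr (func k arr)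

-- ===== LEMMAS AND PROOFS =====

-- the prefix sums Source B's first loop produces, described structurally
def prefixSums (total : Int) (arr : List (List Int)) : List Int :=
  match arr with
  | [] => []
  | row :: rest => total :: prefixSums (total + (PySem.List.pyGet? row 1).getD 0) rest

theorem funcB_prefix_eq (arr : List (List Int)) :
    ∀ (acc : List Int) (total : Int), funcB_prefix acc total arr = acc ++ prefixSums total arr := by
  induction arr with
  | nil => intro acc total; simp [funcB_prefix, prefixSums]
  | cons row rest ih =>
      intro acc total
      simp [funcB_prefix, prefixSums, ih]

theorem scan_eq_loop (arr : List (List Int)) :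
    ∀ (acc : List Int) (total k : Int),
      funcB_scan k (acc ++ prefixSums total arr) (acc.length : Int) arr
        = funcA_loop (k - total) (acc.length : Int) arr := by
  induction arr with
  | nil => intro acc total k; simp [funcB_scan, funcA_loop]
  | cons row rest ih =>
      intro acc total k
      simp only [funcB_scan, funcA_loop, prefixSums]
      have hget : PySem.List.pyGet? (acc ++ total :: prefixSums (total + (PySem.List.pyGet? row 1).getD 0) rest) (acc.length : Int) = some total :=
        PySem.List.pyGet?_append_length acc _ total
      rw [hget]
      simp only [Option.getD_some]
      have hcond : ((PySem.List.pyGet? row 0).getD 0 + total > k) ↔ ((PySem.List.pyGet? row 0).getD 0 > k - total) := by omega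
      by_cases h : (PySem.List.pyGet? row 0).getD 0 + total > k
      · rw [if_pos h, if_pos (hcond.mp h)]
      · rw [if_neg h, if_neg (fun hh => h (hcond.mpr hh))]
        have := ih (acc ++ [total]) (total + (PySem.List.pyGet? row 1).getD 0) k
        simp only [List.length_append, List.length_cons, List.length_nil, List.append_assoc,
          List.cons_append, List.nil_append] at this
        have harith : k - total - (PySem.List.pyGet? row 1).getD 0 = k - (total + (PySem.List.pyGet? row 1).getD 0) := by ring
        rw [harith]
        convert this using 2 <;> push_cast <;> ring

-- ===== VERDICT (by name: the statement is the Claim_ definition above) =====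
theorem func_spec : Claim_equal_func := by
  intro k arr _ _
  unfold Spec_func func func_alt
  rw [funcB_prefix_eq]
  have := scan_eq_loop arr [] 0 k
  simpa using this.symm
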